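-- pv_equiv track=rewrite | github.com/mistakeknot/tldr-swinton | src/tldr_swinton/modules/core/output_formats.py | _take_prefix_by_bytes
-- ===== SOURCE A (Python) =====
-- def _take_prefix_by_bytes(lines: list[str], max_bytes: int) -> list[str]:
--     kept: list[str] = []
--     size = 0
--     for line in lines:
--         line_bytes = len((line + "\n").encode("utf-8"))
--         if size + line_bytes > max_bytes:
--             break
--         kept.append(line)
--         size += line_bytes
--     return kept
-- ===== SOURCE B (Python) =====
-- import bisect
-- import itertools
--
--
-- def _take_prefix_by_bytes(lines: list[str], max_bytes: int) -> list[str]: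
--     sizes = [len((line + "\n").encode("utf-8")) for line in lines]
--     prefix = list(itertools.accumulate(sizes))
--     count = bisect.bisect_right(prefix, max_bytes)
--     return lines[:count]
-- ===== Notes on version B (the rewrite author's own statement) =====
-- stated objective: alternative
-- what changed: Replaces the incremental scan with a running size by a precomputed cumulative byte-size table searched with bisect_right (prefix sums are strictly increasing since every line costs at least one byte), then a single slice.
import Mathlib
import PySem

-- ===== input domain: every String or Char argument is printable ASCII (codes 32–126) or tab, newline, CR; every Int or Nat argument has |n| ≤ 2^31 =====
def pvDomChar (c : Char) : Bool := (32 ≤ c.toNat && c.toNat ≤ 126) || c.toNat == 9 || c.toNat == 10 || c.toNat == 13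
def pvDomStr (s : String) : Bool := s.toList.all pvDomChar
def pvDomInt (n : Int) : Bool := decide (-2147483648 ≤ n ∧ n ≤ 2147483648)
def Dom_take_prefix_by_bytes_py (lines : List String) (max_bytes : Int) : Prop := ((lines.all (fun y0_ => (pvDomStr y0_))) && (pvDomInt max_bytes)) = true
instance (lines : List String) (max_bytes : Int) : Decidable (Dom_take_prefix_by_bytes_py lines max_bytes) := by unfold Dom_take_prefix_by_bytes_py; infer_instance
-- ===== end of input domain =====

-- B replaces A's incremental running-size scan by a cumulative byte-size table
-- searched with bisect_right, then a single slice (alternative decomposition, same cost).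


-- ===== PORT A =====
-- len((line+"\n").encode("utf-8")): on the ASCII domain the utf-8 byte length equals the
-- character count, so it is ported as PySem.Str.len (exact on the stated domain).
def pvLineBytes (line : String) : Int := PySem.Str.len (line ++ "\n")

-- the for-loop of A, carrying (kept is built by the cons results, size is the state)
def pvTakeLoopA (max_bytes : Int) : List String → Int → List String
  | [], _ => []
  | line :: rest, size =>
    let line_bytes := pvLineBytes line
    if size + line_bytes > max_bytes then []
    else line :: pvTakeLoopA max_bytes rest (size + line_bytes)

def take_prefix_by_bytes_py (lines : List String) (max_bytes : Int) : List String :=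
  pvTakeLoopA max_bytes lines 0

-- ===== PORT B =====
-- itertools.accumulate(sizes) starting from running total s
def pvAccumulate (s : Int) : List Int → List Int
  | [] => []
  | x :: xs => (s + x) :: pvAccumulate (s + x) xs

-- bisect.bisect_right is ported as the corresponding PySem primitive
def take_prefix_by_bytes_py_alt (lines : List String) (max_bytes : Int) : List String :=
  let sizes := lines.map pvLineBytes
  let pref := pvAccumulate 0 sizes
  let count := PySem.List.bisectRight pref max_bytes
  lines.take count

-- ===== PRECONDITION & SPEC =====
def Spec_take_prefix_by_bytes_py (lines : List String) (max_bytes : Int) (out : List String) : Prop := out = take_prefix_by_bytes_py_alt lines max_bytes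
instance (lines : List String) (max_bytes : Int) (out : List String) : Decidable (Spec_take_prefix_by_bytes_py lines max_bytes out) := by unfold Spec_take_prefix_by_bytes_py; infer_instance

-- ===== CLAIM (what is proved, stated in full; the proofs are below) =====
def Claim_equal_take_prefix_by_bytes_py : Prop := ∀ (lines : List String) (max_bytes : Int), Dom_take_prefix_by_bytes_py lines max_bytes → Spec_take_prefix_by_bytes_py lines max_bytes (take_prefix_by_bytes_py lines max_bytes)

-- ===== LEMMAS AND PROOFS =====

-- prefix sums of nonnegative sizes are sorted (≤)
theorem pv_accum_pairwise (s : Int) (xs : List Int) (h : ∀ x ∈ xs, 0 ≤ x) :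
    (pvAccumulate s xs).Pairwise (· ≤ ·) := by
  induction xs generalizing s with
  | nil => simp [pvAccumulate]
  | cons x xs ih =>
    have hx : 0 ≤ x := h x (by simp)
    have htail := ih (s + x) (fun y hy => h y (by simp [hy]))
    refine List.Pairwise.cons ?_ htail
    intro a ha
    -- every later prefix sum is ≥ s + x
    have key : ∀ (t : Int) (ys : List Int), (∀ y ∈ ys, 0 ≤ y) → ∀ a ∈ pvAccumulate t ys, t ≤ a := by
      intro t ys
      induction ys generalizing t with
      | nil => intro _ a ha; simp [pvAccumulate] at ha
      | cons y ys ih2 =>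
        intro hys a ha
        simp only [pvAccumulate, List.mem_cons] at ha
        have hy : 0 ≤ y := hys y (by simp)
        rcases ha with rfl | ha
        · omega
        · have := ih2 (t + y) (fun z hz => hys z (by simp [hz])) a ha
          omega
    exact key (s + x) xs (fun y hy => h y (by simp [hy])) a ha

-- length of takeWhile characterised by a cut point
theorem pv_takeWhile_len (p : Int → Bool) (xs : List Int) (k : Nat)
    (hk : k ≤ xs.length)
    (h1 : ∀ (j : Nat) (hj : j < xs.length), j < k → p xs[j] = true)
    (h2 : ∀ (j : Nat) (hj : j < xs.length), k ≤ j → p xs[j] = false) :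
    (xs.takeWhile p).length = k := by
  induction xs generalizing k with
  | nil =>
    simp only [List.length_nil, Nat.le_zero] at hk
    simp [hk]
  | cons x xs ih =>
    cases k with
    | zero =>
      have := h2 0 (by simp) (Nat.zero_le _)
      simp at this
      simp [List.takeWhile, this]
    | succ k =>
      have hx : p x = true := h1 0 (by simp) (Nat.succ_pos _)
      simp only [List.takeWhile, hx, List.length_cons]
      rw [ih k (by simpa using hk)
        (fun j hj hjk => h1 (j + 1) (by simpa using hj) (by omega))
        (fun j hj hjk => h2 (j + 1) (by simpa using hj) (by omega))]

-- on a (≤)-sorted list, bisectRight cuts at the takeWhile (· ≤ x) boundary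
theorem pv_bisect_eq_takeWhile (xs : List Int) (x : Int)
    (hs : xs.Pairwise (· ≤ ·)) :
    PySem.List.bisectRight xs x = (xs.takeWhile (fun a => decide (a ≤ x))).length := by
  obtain ⟨hle, hlt, hgt⟩ := PySem.List.bisectRight_spec xs x hs
  symm
  refine pv_takeWhile_len _ xs _ hle ?_ ?_
  · intro j hj hjk
    simpa using hlt j hj hjk
  · intro j hj hjk
    simpa using (hgt j hj hjk)

-- each encoded line costs a nonnegative number of bytes
theorem pv_lineBytes_nonneg (line : String) : 0 ≤ pvLineBytes line := by
  simp only [pvLineBytes, PySem.Str.len_eq]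
  positivity

-- A's loop returns the prefix cut at the takeWhile boundary of the running sums
theorem pv_loopA_eq_take (max_bytes : Int) (lines : List String) (s : Int) :
    pvTakeLoopA max_bytes lines s =
      lines.take ((pvAccumulate s (lines.map pvLineBytes)).takeWhile
        (fun a => decide (a ≤ max_bytes))).length := by
  induction lines generalizing s with
  | nil => simp [pvTakeLoopA, pvAccumulate]
  | cons line rest ih =>
    simp only [pvTakeLoopA, List.map_cons, pvAccumulate, List.takeWhile]
    by_cases h : s + pvLineBytes line > max_bytes
    · have : (decide (s + pvLineBytes line ≤ max_bytes)) = false := by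
        simp; omega
      simp [h, this]
    · have hle : (decide (s + pvLineBytes line ≤ max_bytes)) = true := by
        simp; omega
      simp only [h, if_false, hle, List.length_cons, List.take_succ_cons]
      rw [ih (s + pvLineBytes line)]

-- ===== VERDICT (by name: the statement is the Claim_ definition above) =====
theorem take_prefix_by_bytes_py_spec : Claim_equal_take_prefix_by_bytes_py := by
  intro lines max_bytes _hdom
  unfold Spec_take_prefix_by_bytes_py take_prefix_by_bytes_py take_prefix_by_bytes_py_alt
  simp only []
  rw [pv_loopA_eq_take, pv_bisect_eq_takeWhile]
  apply pv_accum_pairwise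
  intro x hx
  simp only [List.mem_map] at hx
  obtain ⟨l, _, rfl⟩ := hx
  exact pv_lineBytes_nonneg l
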